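-- pv_equiv track=rewrite | github.com/S0okJu/BOJ | 0-9999/1000-1999/1000-1099/1060/1060.py | solution
-- ===== SOURCE A (Python) =====
-- from typing import List
--
-- def solution(L:int, S: List[int], n:int) -> List[int]:
--
--     S.sort()
--     candidate_list = []
--
--     # 그룹 1: S에 속하는 수 (f(x)=0)
--     for s in S:
--         candidate_list.append((0, s))
--
--     # 그룹 2: 유한 구간 후보 생성 함수
--     def process_gap(L_val, R_val):
--         """
--         구간 [L_val, R_val] 내 후보들을 (f값, 정수) 튜플로 반환.
--         구간의 길이 d = R_val - L_val + 1.
--         각 구간에서는 양끝 (L_val, R_val)가 f값이 최소임.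
--         단, 구간의 길이가 매우 클 수 있으므로 n회(최대 n 라운드)까지만 후보를 생성.
--         """
--         d = R_val - L_val + 1
--         gap_candidates = []
--         # 각 라운드는 양쪽에서 하나씩 후보를 선택
--         # 라운드 i에서 후보: L_val+i (왼쪽)와 R_val-i (오른쪽)
--         # 단, 같은 수가 중복되지 않도록 함.
--         rounds = min(n, (d + 1) // 2)
--         for i in range(rounds):
--             if L_val + i <= R_val - i:
--                 x_left = L_val + i
--                 # f(x) = (x - L_val + 1)*(R_val - x + 1) - 1.
--                 f_val = (i + 1) * (d - i) - 1
--                 gap_candidates.append((f_val, x_left))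
--                 if L_val + i < R_val - i:
--                     x_right = R_val - i
--                     gap_candidates.append((f_val, x_right))
--         return gap_candidates
--
--     # 왼쪽 유한 구간: [1, S[0]-1] (S의 최솟값이 1보다 크다면)
--     if S[0] > 1:
--         candidate_list.extend(process_gap(1, S[0] - 1))
--
--     # S 사이의 간격에 대하여 후보 생성
--     for i in range(len(S) - 1):
--         if S[i+1] - S[i] > 1:  # gap이 존재하면
--             L_val = S[i] + 1
--             R_val = S[i+1] - 1
--             candidate_list.extend(process_gap(L_val, R_val))
--
--     # 그룹 3: 무한 구간 후보 (S의 최대 원소보다 큰 수)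
--     # 무한 구간은 f값을 무한(inf)로 처리하며, 오름차순 정렬 시 S[-1]+1, S[-1]+2, ... 순임.
--     maxS = S[-1]
--     for x in range(maxS + 1, maxS + 1 + n):
--         candidate_list.append((float('inf'), x))
--
--     # 모든 후보를 (f값, 정수) 기준으로 정렬 (f값이 같으면 정수가 작은 순)
--     candidate_list.sort(key=lambda pair: (pair[0], pair[1]))
--
--     # 정렬된 전체 후보 중 앞쪽 n개의 정수를 추출
--     result = [candidate_list[i][1] for i in range(n)]
--     return result
-- ===== SOURCE B (Python) =====
-- # B: no global sort and no infinity sentinels -- each gap's candidates are generated already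
-- # in (f, x) order, the sorted runs are combined by balanced pairwise merging, and the
-- # beyond-max(S) slots are filled directly with max(S)+1, max(S)+2, ...
-- # Note: A sorts S in place; B leaves S untouched (equivalence is about the return value).
-- def run_of(lo, hi, n):
--     d = hi - lo + 1
--     return [((i + 1) * (d - i) - 1, x)
--             for i in range(min(n, (d + 1) // 2))
--             for x in ([lo + i] if lo + i == hi - i else [lo + i, hi - i])]
--
-- def merge(a, b):
--     i = j = 0
--     out = []
--     while i < len(a) and j < len(b):
--         if a[i] <= b[j]:
--             out.append(a[i]); i += 1
--         else:
--             out.append(b[j]); j += 1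
--     out += a[i:]
--     out += b[j:]
--     return out
--
-- def merge_pairs(runs):
--     out = []
--     i = 0
--     while i + 1 < len(runs):
--         out.append(merge(runs[i], runs[i + 1]))
--         i += 2
--     if i < len(runs):
--         out.append(runs[i])
--     return out
--
-- def solution(L, S, n):
--     xs = sorted(S)
--     first, last = xs[0], xs[-1]
--     gaps = ([(1, first - 1)] if first > 1 else []) \
--         + [(a + 1, b - 1) for a, b in zip(xs, xs[1:]) if b - a > 1]
--     runs = [[(0, s) for s in xs]] + [run_of(lo, hi, n) for lo, hi in gaps]
--     while len(runs) > 1: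
--         runs = merge_pairs(runs)
--     ordered = runs[0]
--     k = max(n, 0)
--     out = [x for _, x in ordered[:k]]
--     k -= len(out)
--     return out + [last + 1 + j for j in range(k)]
-- ===== Notes on version B (the rewrite author's own statement) =====
-- stated objective: alternative
-- what changed: A builds one flat candidate list (with float('inf') sentinels for the beyond-max(S) group) and sorts all of it before taking the first n; B generates each gap's candidates already in (f,x) order, combines these sorted runs by balanced pairwise merging, takes the first n, and fills any remaining slots directly with max(S)+1, max(S)+2, ..., so the global sort and the infinity sentinels disappear.
-- outside the precondition, e.g. on solution(0, [], 1): A raises IndexError, B raises IndexError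
import Mathlib
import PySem

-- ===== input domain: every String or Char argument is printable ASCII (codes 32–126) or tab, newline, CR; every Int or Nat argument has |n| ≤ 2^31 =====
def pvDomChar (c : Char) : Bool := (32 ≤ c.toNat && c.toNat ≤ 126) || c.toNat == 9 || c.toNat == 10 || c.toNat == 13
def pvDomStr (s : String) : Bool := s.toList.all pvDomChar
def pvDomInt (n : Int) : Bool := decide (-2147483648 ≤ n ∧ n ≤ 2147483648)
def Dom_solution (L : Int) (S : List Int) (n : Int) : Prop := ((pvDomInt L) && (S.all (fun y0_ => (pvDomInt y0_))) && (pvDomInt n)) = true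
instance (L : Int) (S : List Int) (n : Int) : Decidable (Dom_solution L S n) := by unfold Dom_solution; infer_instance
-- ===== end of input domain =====

-- B replaces A's build-everything-then-sort with balanced pairwise merging of the already
-- sorted per-gap candidate runs (no global sort, no infinity sentinels; the beyond-max(S)
-- slots are filled directly). Return-value equivalence only: Python A sorts S in place,
-- B does not mutate S.

-- ===== PORT A =====
-- float('inf') is ported as the integer constant pvInf = 2^200: it is used only as a sort
-- key, and on Dom_solution every finite f-value is below 2^70, so all comparisons agree
-- exactly with Python's int-vs-float('inf') comparisons.
def pvInf : Int := 2^200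

def processGap (Lv Rv n : Int) : List (Int × Int) :=
  let d := Rv - Lv + 1
  let rounds := min n (PySem.Int.floordiv (d + 1) 2)
  (PySem.List.pyRange 0 rounds 1).foldl (fun acc i =>
    if Lv + i ≤ Rv - i then
      let fv := (i + 1) * (d - i) - 1
      let acc2 := acc ++ [(fv, Lv + i)]
      if Lv + i < Rv - i then acc2 ++ [(fv, Rv - i)] else acc2
    else acc) []

-- S[0] / S[-1] raise IndexError on empty S (excluded by Pre_solution); the pyGetD default
-- is never read on Pre_.  Python's tuple key (pair[0], pair[1]) compares lexicographically:
-- ported as the key  fun p => toLex p  into Lex (Int × Int).  The final comprehension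
-- candidate_list[i] is always in range for 0 ≤ i < n (group 3 alone has n entries),
-- so its pyGetD default is never read either.
def solution (L : Int) (S : List Int) (n : Int) : List Int :=
  let xs := PySem.List.sorted S (fun x => x) false
  let cl1 := xs.foldl (fun acc s => acc ++ [((0 : Int), s)]) []
  let s0 := PySem.List.pyGetD xs 0 0
  let cl2 := if s0 > 1 then cl1 ++ processGap 1 (s0 - 1) n else cl1
  let cl3 := (PySem.List.pyRange 0 (PySem.List.len xs - 1) 1).foldl (fun acc i =>
      if PySem.List.pyGetD xs (i + 1) 0 - PySem.List.pyGetD xs i 0 > 1 then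
        acc ++ processGap (PySem.List.pyGetD xs i 0 + 1) (PySem.List.pyGetD xs (i + 1) 0 - 1) n
      else acc) cl2
  let maxS := PySem.List.pyGetD xs (-1) 0
  let cl4 := (PySem.List.pyRange (maxS + 1) (maxS + 1 + n) 1).foldl
      (fun acc x => acc ++ [(pvInf, x)]) cl3
  let cls := PySem.List.sorted cl4 (fun p => toLex p) false
  (PySem.List.pyRange 0 n 1).map (fun i => (PySem.List.pyGetD cls i (0, 0)).2)

-- ===== PORT B =====
def runOf (lo hi n : Int) : List (Int × Int) :=
  let d := hi - lo + 1
  (PySem.List.pyRange 0 (min n (PySem.Int.floordiv (d + 1) 2)) 1).flatMap (fun i =>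
    (if lo + i == hi - i then [lo + i] else [lo + i, hi - i]).map
      (fun x => ((i + 1) * (d - i) - 1, x)))

def pvMergePairs : List (List (Int × Int)) → List (List (Int × Int))
  | a :: b :: rest =>
    (a.merge b (fun x y => decide (toLex x ≤ toLex y))) :: pvMergePairs rest
  | l => l

-- needed by pvMergeAll's termination (cited in decreasing_by)
theorem pvMergePairs_length_le (l : List (List (Int × Int))) :
    (pvMergePairs l).length ≤ l.length := by
  induction l using pvMergePairs.induct with
  | case1 a b rest ih => simp only [pvMergePairs, List.length_cons]; omega
  | case2 l h => rw [pvMergePairs.eq_def]; split <;> simp_all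

-- 'while len(runs) > 1: runs = merge_pairs(runs)'
def pvMergeAll : List (List (Int × Int)) → List (Int × Int)
  | [] => []
  | [r] => r
  | a :: b :: rest => pvMergeAll (pvMergePairs (a :: b :: rest))
  termination_by l => l.length
  decreasing_by
    simp only [pvMergePairs, List.length_cons]
    exact Nat.lt_succ_of_le (Nat.succ_le_succ (pvMergePairs_length_le rest))

-- xs[0] / xs[-1] raise IndexError on empty S (excluded by Pre_solution);
-- ordered[:k] with k = max(n, 0) ≥ 0 is PySem.List.slice with upper bound k
def solution_alt (L : Int) (S : List Int) (n : Int) : List Int :=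
  let xs := PySem.List.sorted S (fun x => x) false
  let first := PySem.List.pyGetD xs 0 0
  let lastS := PySem.List.pyGetD xs (-1) 0
  let gaps := (if first > 1 then [((1 : Int), first - 1)] else []) ++
    ((xs.zip xs.tail).filter (fun ab => ab.2 - ab.1 > 1)).map
      (fun ab => (ab.1 + 1, ab.2 - 1))
  let runs := xs.map (fun s => ((0 : Int), s)) :: gaps.map (fun g => runOf g.1 g.2 n)
  let ordered := pvMergeAll runs
  let k := max n 0
  let out := (PySem.List.slice ordered none (some k)).map (·.2)
  let k2 := k - PySem.List.len out
  out ++ (PySem.List.pyRange 0 k2 1).map (fun j => lastS + 1 + j)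

-- ===== PRECONDITION & SPEC =====
-- Python A evaluates S[0] after sorting: on S = [] it raises IndexError, excluded here.
def Pre_solution (L : Int) (S : List Int) (n : Int) : Prop := S ≠ []
instance (L : Int) (S : List Int) (n : Int) : Decidable (Pre_solution L S n) := by
  unfold Pre_solution; infer_instance

def pvWitness_solution : Int × List Int × Int := (0, ([1, 3], 2))

def Spec_solution (L : Int) (S : List Int) (n : Int) (out : List Int) : Prop :=
  out = solution_alt L S n
instance (L : Int) (S : List Int) (n : Int) (out : List Int) :
    Decidable (Spec_solution L S n out) := by unfold Spec_solution; infer_instance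

-- ===== CLAIM (what is proved, stated in full; the proofs are below) =====
def Claim_equal_solution : Prop := ∀ (L : Int) (S : List Int) (n : Int),
  Dom_solution L S n → Pre_solution L S n → Spec_solution L S n (solution L S n)

-- ===== LEMMAS AND PROOFS =====

-- the lexicographic order on candidate pairs, as a plain relation
def pvLe (a b : Int × Int) : Prop := toLex a ≤ toLex b

theorem pv_sorted_eq {cs ys : List (Int × Int)} (hperm : ys.Perm cs)
    (hsort : ys.Pairwise pvLe) :
    PySem.List.sorted cs (fun p => toLex p) false = ys := by
  refine List.Perm.eq_of_pairwise (le := pvLe)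
    (fun a b _ _ h1 h2 => toLex.injective (le_antisymm h1 h2)) ?_ hsort
    (((PySem.List.sorted_perm cs (fun p => toLex p) false)).trans hperm.symm)
  exact PySem.List.sorted_pairwise cs (fun p => toLex p)

theorem pvMerge_pairwise {a b : List (Int × Int)} (ha : a.Pairwise pvLe)
    (hb : b.Pairwise pvLe) :
    (a.merge b (fun x y => decide (toLex x ≤ toLex y))).Pairwise pvLe := by
  have h := List.sorted_merge (le := fun x y : Int × Int => decide (toLex x ≤ toLex y))
    (fun x y z hxy hyz => by
      simp only [decide_eq_true_eq] at *; exact le_trans hxy hyz)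
    (fun x y => by simp only [Bool.or_eq_true, decide_eq_true_eq]; exact le_total _ _)
    a b (by simpa [pvLe] using ha) (by simpa [pvLe] using hb)
  simpa [pvLe] using h

theorem pvMergePairs_flatten_perm (l : List (List (Int × Int))) :
    (pvMergePairs l).flatten.Perm l.flatten := by
  induction l using pvMergePairs.induct with
  | case1 a b rest ih =>
    simp only [pvMergePairs, List.flatten_cons]
    calc ((a.merge b (fun x y => decide (toLex x ≤ toLex y))) ++ (pvMergePairs rest).flatten).Perm
          ((a ++ b) ++ rest.flatten) :=
        (List.merge_perm_append _).append ih
      _ = a ++ (b ++ rest.flatten) := by simp [List.append_assoc]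
  | case2 l h => rw [pvMergePairs.eq_def]; split <;> simp_all

theorem pvMergePairs_sorted {l : List (List (Int × Int))}
    (hs : ∀ r ∈ l, r.Pairwise pvLe) :
    ∀ r ∈ pvMergePairs l, r.Pairwise pvLe := by
  induction l using pvMergePairs.induct with
  | case1 a b rest ih =>
    intro r hr
    rcases List.mem_cons.mp hr with rfl | hr'
    · exact pvMerge_pairwise (hs a (by simp)) (hs b (by simp))
    · exact ih (fun r hr => hs r (by simp [hr])) r hr'
  | case2 l h => rw [pvMergePairs.eq_def]; split <;> simp_all

theorem pvMergeAll_eq : ∀ (l : List (List (Int × Int))),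
    (∀ r ∈ l, r.Pairwise pvLe) →
    pvMergeAll l = PySem.List.sorted l.flatten (fun p => toLex p) false := by
  intro l
  induction l using pvMergeAll.induct with
  | case1 => intro _; simp [pvMergeAll, PySem.List.sorted]
  | case2 r =>
    intro hs
    rw [pvMergeAll]
    exact (pv_sorted_eq (by simp) (hs r (by simp))).symm
  | case3 a b rest ih =>
    intro hs
    rw [pvMergeAll, ih (pvMergePairs_sorted hs)]
    exact PySem.List.sorted_eq_sorted_of_perm _ _ _ toLex.injective
      (pvMergePairs_flatten_perm _)

theorem rounds_bound {lo hi n i : Int}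
    (h : i ∈ PySem.List.pyRange 0 (min n (PySem.Int.floordiv (hi - lo + 1 + 1) 2)) 1) :
    0 ≤ i ∧ 2 * i ≤ hi - lo := by
  rw [PySem.List.mem_pyRange_one] at h
  obtain ⟨h0, h1⟩ := h
  refine ⟨h0, ?_⟩
  have h2 : i < PySem.Int.floordiv (hi - lo + 1 + 1) 2 := lt_of_lt_of_le h1 (min_le_right _ _)
  rw [show hi - lo + 1 + 1 = hi - lo + 2 from by ring] at h2
  have h3 : (i + 1) ≤ PySem.Int.floordiv (hi - lo + 2) 2 := by omega
  rw [PySem.Int.le_floordiv_iff_mul_le (by norm_num)] at h3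
  omega

theorem processGap_eq_runOf (lo hi n : Int) : processGap lo hi n = runOf lo hi n := by
  unfold processGap runOf
  simp only []
  rw [PySem.List.foldl_congr_mem _ _
    (fun acc i => acc ++ ((if lo + i == hi - i then [lo + i] else [lo + i, hi - i]).map
      (fun x => ((i + 1) * (hi - lo + 1 - i) - 1, x)))) []
    ?_, PySem.List.foldl_append_eq_flatMap]
  · simp
  · intro acc i hi'
    obtain ⟨h0, h2i⟩ := rounds_bound hi'
    have hle : lo + i ≤ hi - i := by omega
    simp only [if_pos hle]
    by_cases hlt : lo + i < hi - i
    · have : (lo + i == hi - i) = false := by simp; omega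
      simp [if_pos hlt, this, List.append_assoc]
    · have heq : (lo + i == hi - i) = true := by simp; omega
      simp [if_neg hlt, heq]

theorem runOf_pairwise (lo hi n : Int) : (runOf lo hi n).Pairwise pvLe := by
  unfold runOf
  rw [List.pairwise_flatMap]
  constructor
  · intro i hi'
    obtain ⟨h0, h2i⟩ := rounds_bound hi'
    by_cases he : lo + i = hi - i
    · simp [he]
    · have : (lo + i == hi - i) = false := by simp [he]
      simp only [this, if_neg, Bool.false_eq_true, List.map_cons, List.map_nil]
      refine List.Pairwise.cons ?_ (by simp)
      intro y hy
      simp at hy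
      subst hy
      unfold pvLe
      rw [Prod.Lex.le_iff]
      simp only [ofLex_toLex]
      right
      exact ⟨trivial, by omega⟩
  · have hpw := PySem.List.pairwise_lt_pyRange_one 0
      (min n (PySem.Int.floordiv (hi - lo + 1 + 1) 2))
    rw [List.Pairwise.and_mem] at hpw
    refine hpw.imp ?_
    rintro i j ⟨hmi, hmj, hij⟩ x hx y hy
    obtain ⟨hi0, h2i⟩ := rounds_bound hmi
    obtain ⟨hj0, h2j⟩ := rounds_bound hmj
    -- x has first component φ i, y has φ j, and φ i < φ j
    have hx1 : x.1 = (i + 1) * (hi - lo + 1 - i) - 1 := by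
      rcases List.mem_map.mp hx with ⟨z, _, rfl⟩; rfl
    have hy1 : y.1 = (j + 1) * (hi - lo + 1 - j) - 1 := by
      rcases List.mem_map.mp hy with ⟨z, _, rfl⟩; rfl
    unfold pvLe
    rw [Prod.Lex.le_iff]
    simp only [ofLex_toLex]
    left
    rw [hx1, hy1]
    have hd : 2 * j ≤ hi - lo := h2j
    have key : (j + 1) * (hi - lo + 1 - j) - (i + 1) * (hi - lo + 1 - i)
        = (j - i) * ((hi - lo + 1) - i - j - 1) := by ring
    have h1 : 1 ≤ j - i := by omega
    have h2 : 1 ≤ (hi - lo + 1) - i - j - 1 := by omega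
    nlinarith

theorem pv_zip_eq (xs : List Int) :
    (PySem.List.pyRange 0 (PySem.List.len xs - 1) 1).map
      (fun i => (PySem.List.pyGetD xs i 0, PySem.List.pyGetD xs (i + 1) 0)) =
    xs.zip xs.tail := by
  apply List.ext_getElem
  · simp [PySem.List.pyRange_one, PySem.List.len]
  · intro k h1 h2
    have hk : k < xs.length - 1 := by
      simpa [PySem.List.length_pyRange_one, PySem.List.len] using h1
    have hk1 : (0 : Int) + k + 1 = ((k + 1 : Nat) : Int) := by push_cast; ring
    simp only [List.getElem_map, PySem.List.getElem_pyRange_one, List.getElem_zip,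
      List.getElem_tail]
    rw [hk1]
    rw [show ((0 : Int) + k) = ((k : Nat) : Int) by push_cast; ring]
    rw [PySem.List.pyGetD_eq_getElem xs 0 (by positivity) (by push_cast; omega),
        PySem.List.pyGetD_eq_getElem xs 0 (by positivity) (by push_cast; omega)]
    simp

theorem pv_foldl_append_if' {α β : Type} (p : α → Prop) [DecidablePred p]
    (g : α → List β) (l : List α) (acc : List β) :
    l.foldl (fun acc x => if p x then acc ++ g x else acc) acc
      = acc ++ (l.filter (fun x => decide (p x))).flatMap g := by
  induction l generalizing acc with
  | nil => simp
  | cons x xs ih =>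
    by_cases hp : p x <;> simp [hp, ih]

theorem pv_map_range_take (cls : List (Int × Int)) (n : Int)
    (h : n ≤ (cls.length : Int)) :
    (PySem.List.pyRange 0 n 1).map (fun i => (PySem.List.pyGetD cls i (0, 0)).2) =
      (cls.take n.toNat).map (·.2) := by
  apply List.ext_getElem
  · simp [PySem.List.length_pyRange_one]
    omega
  · intro k h1 h2
    have hk : k < n.toNat := by
      simpa [PySem.List.length_pyRange_one] using h1
    simp only [List.getElem_map, PySem.List.getElem_pyRange_one, List.getElem_take]
    rw [show ((0 : Int) + k) = ((k : Nat) : Int) by push_cast; ring]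
    rw [PySem.List.pyGetD_eq_getElem cls (0, 0) (by positivity) (by push_cast; omega)]
    simp

-- A's middle gap loop over indices equals a flatMap over filtered adjacent pairs
theorem pv_mid_fold (xs : List Int) (n : Int) (acc : List (Int × Int)) :
    (PySem.List.pyRange 0 (PySem.List.len xs - 1) 1).foldl (fun acc i =>
      if PySem.List.pyGetD xs (i + 1) 0 - PySem.List.pyGetD xs i 0 > 1 then
        acc ++ processGap (PySem.List.pyGetD xs i 0 + 1) (PySem.List.pyGetD xs (i + 1) 0 - 1) n
      else acc) acc
    = acc ++ ((xs.zip xs.tail).filter (fun ab => ab.2 - ab.1 > 1)).flatMap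
        (fun ab => processGap (ab.1 + 1) (ab.2 - 1) n) := by
  have step1 := PySem.List.foldl_congr_mem
    (PySem.List.pyRange 0 (PySem.List.len xs - 1) 1)
    (fun acc i =>
      if PySem.List.pyGetD xs (i + 1) 0 - PySem.List.pyGetD xs i 0 > 1 then
        acc ++ processGap (PySem.List.pyGetD xs i 0 + 1) (PySem.List.pyGetD xs (i + 1) 0 - 1) n
      else acc)
    (fun acc i =>
      (fun (acc : List (Int × Int)) (ab : Int × Int) =>
        if ab.2 - ab.1 > 1 then acc ++ processGap (ab.1 + 1) (ab.2 - 1) n else acc) acc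
      ((fun i => (PySem.List.pyGetD xs i 0, PySem.List.pyGetD xs (i + 1) 0)) i))
    acc (fun _ _ _ => rfl)
  have step2 := List.foldl_map
    (f := fun i => (PySem.List.pyGetD xs i 0, PySem.List.pyGetD xs (i + 1) 0))
    (g := fun (acc : List (Int × Int)) (ab : Int × Int) =>
      if ab.2 - ab.1 > 1 then acc ++ processGap (ab.1 + 1) (ab.2 - 1) n else acc)
    (l := PySem.List.pyRange 0 (PySem.List.len xs - 1) 1) (init := acc)
  rw [step1, ← step2, pv_zip_eq, pv_foldl_append_if']

-- sorted S is pairwise ≤, lifted to the (0, s) run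
theorem pv_group1_pairwise (S : List Int) :
    ((PySem.List.sorted S (fun x => x) false).map
      (fun s => ((0 : Int), s))).Pairwise pvLe := by
  refine List.Pairwise.map _ ?_ (PySem.List.sorted_pairwise S (fun x => x))
  intro a b hab
  unfold pvLe
  rw [Prod.Lex.le_iff]
  simp only [ofLex_toLex]
  exact Or.inr ⟨by simp, hab⟩

-- every finite candidate's f-value is below pvInf, given 32-bit bounded gap ends
theorem runOf_fst_bound {lo hi n : Int} (hlo : -(2 ^ 32) ≤ lo) (hhi : hi ≤ 2 ^ 32) :
    ∀ a ∈ runOf lo hi n, a.1 < pvInf := by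
  intro a ha
  unfold runOf at ha
  rcases List.mem_flatMap.mp ha with ⟨i, hmi, hma⟩
  obtain ⟨h0, h2i⟩ := rounds_bound hmi
  rcases List.mem_map.mp hma with ⟨x, _, rfl⟩
  show (i + 1) * (hi - lo + 1 - i) - 1 < pvInf
  have hd : hi - lo + 1 ≤ 2 ^ 33 + 1 := by omega
  have h1 : i + 1 ≤ hi - lo + 1 := by omega
  have h2 : hi - lo + 1 - i ≤ hi - lo + 1 := by omega
  have h3 : (0 : Int) ≤ i + 1 := by omega
  have h4 : (0 : Int) ≤ hi - lo + 1 - i := by omega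
  have h5 : (i + 1) * (hi - lo + 1 - i) ≤ (hi - lo + 1) * (hi - lo + 1) :=
    mul_le_mul h1 h2 h4 (by omega)
  have h6 : (hi - lo + 1) * (hi - lo + 1) ≤ (2 ^ 33 + 1) * (2 ^ 33 + 1) :=
    mul_le_mul hd hd (by omega) (by positivity)
  unfold pvInf
  nlinarith

-- the "beyond max(S)" tail: first m infinite candidates vs direct fill
theorem pv_tail_fill (maxS n : Int) (m : Nat) (hm : m ≤ n.toNat) :
    ((((PySem.List.pyRange (maxS + 1) (maxS + 1 + n) 1).map
        (fun x => (pvInf, x))).take m).map (·.2)) =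
    (PySem.List.pyRange 0 (m : Int) 1).map (fun j => maxS + 1 + j) := by
  rw [PySem.List.pyRange_one (maxS + 1) (maxS + 1 + n), PySem.List.pyRange_one 0 (m : Int)]
  rw [show (maxS + 1 + n - (maxS + 1)) = n by ring]
  rw [show ((m : Int) - 0) = (m : Int) by ring, Int.toNat_natCast]
  rw [← List.map_take, ← List.map_take, List.take_range]
  have : min m n.toNat = m := by omega
  rw [this]
  simp [List.map_map, Function.comp_def]

-- ===== VERDICT (by name: the statement is the Claim_ definition above) =====
theorem solution_spec : Claim_equal_solution := by
  intro L S n hdom hpre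
  unfold Spec_solution solution solution_alt
  simp only []
  set xs := PySem.List.sorted S (fun x => x) false with hxs
  -- Dom bounds on the members of xs
  have hbound : ∀ x ∈ xs, -(2 ^ 31) ≤ x ∧ x ≤ 2 ^ 31 := by
    intro x hx
    have hxS : x ∈ S := (PySem.List.mem_sorted _ _ _ _).mp hx
    unfold Dom_solution at hdom
    simp only [Bool.and_eq_true, List.all_eq_true] at hdom
    have := hdom.1.2 x hxS
    unfold pvDomInt at this
    simp at this
    omega
  have hxs_ne : xs ≠ [] := by
    intro hnil
    exact hpre ((PySem.List.sorted_eq_nil_iff S (fun x => x) false).mp (hxs ▸ hnil))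
  -- names
  set first := PySem.List.pyGetD xs 0 0 with hfirst
  set maxS := PySem.List.pyGetD xs (-1) 0 with hmaxS
  set gaps := (if first > 1 then [((1 : Int), first - 1)] else []) ++
    ((xs.zip xs.tail).filter (fun ab => ab.2 - ab.1 > 1)).map
      (fun ab => (ab.1 + 1, ab.2 - 1)) with hgaps
  set runs := xs.map (fun s => ((0 : Int), s)) :: gaps.map (fun g => runOf g.1 g.2 n)
    with hruns
  set F := runs.flatten with hF
  set I := (PySem.List.pyRange (maxS + 1) (maxS + 1 + n) 1).map (fun x => (pvInf, x))
    with hI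
  -- A's candidate list is F ++ I
  have hcl : (PySem.List.pyRange (maxS + 1) (maxS + 1 + n) 1).foldl
      (fun acc x => acc ++ [(pvInf, x)])
      ((PySem.List.pyRange 0 (PySem.List.len xs - 1) 1).foldl (fun acc i =>
        if PySem.List.pyGetD xs (i + 1) 0 - PySem.List.pyGetD xs i 0 > 1 then
          acc ++ processGap (PySem.List.pyGetD xs i 0 + 1)
            (PySem.List.pyGetD xs (i + 1) 0 - 1) n
        else acc)
        (if first > 1 then
          (xs.foldl (fun acc s => acc ++ [((0 : Int), s)]) []) ++ processGap 1 (first - 1) n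
         else xs.foldl (fun acc s => acc ++ [((0 : Int), s)]) []))
      = F ++ I := by
    rw [PySem.List.foldl_append_singleton_eq_map, pv_mid_fold,
        PySem.List.foldl_append_singleton_eq_map]
    simp only [hF, hruns, hgaps]
    by_cases hf1 : first > 1 <;>
      simp [hf1, hI, List.flatMap_append, List.flatMap_map, processGap_eq_runOf,
        ← List.flatMap_def, Function.comp_def, List.append_assoc]
  rw [hcl]
  -- every finite candidate is below the infinity sentinel
  have hFbound : ∀ a ∈ F, a.1 < pvInf := by
    intro a ha
    rcases List.mem_flatten.mp ha with ⟨r, hr, har⟩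
    rcases List.mem_cons.mp hr with rfl | hr'
    · rcases List.mem_map.mp har with ⟨s, _, rfl⟩
      unfold pvInf; norm_num
    · rcases List.mem_map.mp hr' with ⟨g, hg, rfl⟩
      have hgb : -(2 ^ 32) ≤ g.1 ∧ g.2 ≤ 2 ^ 32 := by
        rw [hgaps] at hg
        rcases List.mem_append.mp hg with hg' | hg'
        · have hmem0 : first ∈ xs := by
            rw [hfirst, PySem.List.pyGetD_eq_getElem xs 0 (le_refl 0)
              (by simp; exact Nat.pos_of_ne_zero (fun h => hxs_ne (List.eq_nil_of_length_eq_zero h)))]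
            exact List.getElem_mem _
          have := hbound first hmem0
          split at hg' <;> simp at hg'
          obtain ⟨h1, h2⟩ := hg'
          constructor <;> omega
        · rcases List.mem_map.mp hg' with ⟨ab, hab, rfl⟩
          have habz := List.of_mem_zip (List.mem_of_mem_filter hab)
          have h1 := hbound ab.1 habz.1
          have h2 := hbound ab.2 (List.mem_of_mem_tail habz.2)
          constructor <;> simp <;> omega
      exact runOf_fst_bound hgb.1 hgb.2 a har
  -- all runs are sorted
  have hRunsSorted : ∀ r ∈ runs, r.Pairwise pvLe := by
    intro r hr
    rcases List.mem_cons.mp hr with rfl | hr'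
    · rw [hxs]; exact pv_group1_pairwise S
    · rcases List.mem_map.mp hr' with ⟨g, _, rfl⟩
      exact runOf_pairwise g.1 g.2 n
  -- the sorted candidate list splits: finite part sorted, then the infinite tail
  have hsplit : PySem.List.sorted (F ++ I) (fun p => toLex p) false =
      PySem.List.sorted F (fun p => toLex p) false ++ I := by
    refine pv_sorted_eq ((PySem.List.sorted_perm F _ false).append_right I) ?_
    rw [List.pairwise_append]
    refine ⟨PySem.List.sorted_pairwise F _, ?_, ?_⟩
    · rw [hI]
      refine List.Pairwise.map _ ?_ (PySem.List.pairwise_lt_pyRange_one _ _)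
      intro a b hab
      unfold pvLe
      rw [Prod.Lex.le_iff]
      simp only [ofLex_toLex]
      exact Or.inr ⟨by simp, le_of_lt hab⟩
    · intro a ha b hb
      have haF : a ∈ F := (PySem.List.mem_sorted _ _ _ _).mp ha
      rcases List.mem_map.mp (hI ▸ hb) with ⟨x, _, rfl⟩
      unfold pvLe
      rw [Prod.Lex.le_iff]
      simp only [ofLex_toLex]
      exact Or.inl (hFbound a haF)
  rw [hsplit]
  -- B's merge of the sorted runs is the sorted finite candidate list
  have hMA : pvMergeAll runs = PySem.List.sorted F (fun p => toLex p) false := by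
    rw [pvMergeAll_eq runs hRunsSorted, hF]
  rw [hMA]
  -- B's slice ordered[:k] with k = max n 0 is a take of n.toNat elements
  rw [show max n 0 = ((n.toNat : Nat) : Int) by omega, PySem.List.slice_to_natCast]
  -- A's comprehension is a take
  have hlenI : I.length = n.toNat := by
    rw [hI]
    simp [PySem.List.length_pyRange_one]
  have hlenS : (PySem.List.sorted F (fun p => toLex p) false).length = F.length :=
    (PySem.List.sorted_perm F _ false).length_eq
  rw [pv_map_range_take _ n (by
    rw [List.length_append, hlenS, hlenI]
    omega)]
  rw [List.take_append, List.map_append]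
  congr 1
  rw [hlenS, hI, pv_tail_fill maxS n (n.toNat - F.length) (by omega)]
  congr 2
  simp [PySem.List.len]
  omega
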